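-- pv_equiv track=rewrite | github.com/AnMunSR/StudyPython | BaiTapXuLyList/Bai72.py | tim_chuoi_co_vi_tri_in_hoa_lon_nhat
-- ===== SOURCE A (Python) =====
-- def vi_tri_in_hoa_lon_nhat(s):
--     """Tìm vị trí lớn nhất của ký tự in hoa trong chuỗi s"""
--     vi_tri = -1
--     for i, char in enumerate(s):
--         if char.isupper():
--             vi_tri = i  # Cập nhật vị trí lớn nhất
--     return vi_tri
--
-- def tim_chuoi_co_vi_tri_in_hoa_lon_nhat(L):
--     """Tìm chuỗi có vị trí ký tự in hoa lớn nhất trong list L"""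
--     chuoi_max = None
--     vi_tri_max = -1
--
--     for chuoi in L:
--         vi_tri = vi_tri_in_hoa_lon_nhat(chuoi)
--         if vi_tri > vi_tri_max:
--             vi_tri_max = vi_tri
--             chuoi_max = chuoi
--
--     return chuoi_max if chuoi_max else "Không có chuỗi nào chứa ký tự in hoa!"
-- ===== SOURCE B (Python) =====
-- def tim_chuoi_co_vi_tri_in_hoa_lon_nhat(L):
--     """Tìm chuỗi có vị trí ký tự in hoa lớn nhất trong list L"""
--     # Column-major: walk the character positions from the highest possible index
--     # downwards; the first string that has an uppercase letter at the current
--     # column is the answer (no per-string last-uppercase index is ever computed).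
--     maxlen = max(map(len, L), default=0)
--     for j in range(maxlen - 1, -1, -1):
--         for s in L:
--             if j < len(s) and s[j].isupper():
--                 return s
--     return "Không có chuỗi nào chứa ký tự in hoa!"
-- ===== Notes on version B (the rewrite author's own statement) =====
-- stated objective: alternative
-- what changed: B removes A's per-string last-uppercase-index helper and arg-max loop entirely: it scans character columns from the highest position downwards and returns the first string of L that has an uppercase letter in the current column (correct because the first string hit at the largest such column is exactly A's first arg-max).
import Mathlib
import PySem

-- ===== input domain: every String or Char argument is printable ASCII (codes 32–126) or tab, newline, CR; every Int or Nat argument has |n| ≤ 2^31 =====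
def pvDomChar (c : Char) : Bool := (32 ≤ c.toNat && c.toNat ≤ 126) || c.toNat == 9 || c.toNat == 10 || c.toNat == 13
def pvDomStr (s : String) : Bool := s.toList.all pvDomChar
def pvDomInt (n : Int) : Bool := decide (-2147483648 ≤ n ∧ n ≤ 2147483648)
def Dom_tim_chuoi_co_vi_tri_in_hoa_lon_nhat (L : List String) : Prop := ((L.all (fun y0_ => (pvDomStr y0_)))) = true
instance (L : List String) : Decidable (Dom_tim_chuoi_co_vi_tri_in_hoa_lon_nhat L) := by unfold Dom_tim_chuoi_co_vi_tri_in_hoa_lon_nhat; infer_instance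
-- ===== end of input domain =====

-- B replaces A's per-string last-uppercase-index helper + arg-max loop by a
-- column-major scan: from the highest character position downwards, return the
-- first string with an uppercase letter at that column (alternative; same result).

-- ===== PORT A =====
-- forward scan keeping the last uppercase index seen
def vi_tri_in_hoa_lon_nhat (s : String) : Int :=
  (PySem.List.enumerate s.toList 0).foldl
    (fun vi_tri ic => if PySem.Str.isupper ic.2 then ic.1 else vi_tri) (-1)

def tim_chuoi_co_vi_tri_in_hoa_lon_nhat (L : List String) : String :=
  -- final `chuoi_max if chuoi_max else "…"`: Python truthiness of Option/str
  match (L.foldl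
    (fun acc chuoi =>
      let vi_tri := vi_tri_in_hoa_lon_nhat chuoi
      if acc.2 < vi_tri then (some chuoi, vi_tri) else acc)
    ((none : Option String), (-1 : Int))).1 with
  | none => "Không có chuỗi nào chứa ký tự in hoa!"
  | some c => if c = "" then "Không có chuỗi nào chứa ký tự in hoa!" else c

-- ===== PORT B =====
-- `max(map(len, L), default=0)`
def pvMaxLen (L : List String) : Nat := L.foldl (fun m s => max m s.toList.length) 0

-- `j < len(s) and s[j].isupper()`  (j is a valid non-negative index here)
def pvColHit (j : Nat) (s : String) : Bool :=
  match s.toList[j]? with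
  | some c => PySem.Str.isupper c
  | none => false

-- `for j in range(maxlen-1,-1,-1): for s in L: if hit: return s`
-- outer countdown loop as recursion on the remaining column count;
-- the inner loop with early return is List.find?
def pvScanCols (L : List String) : Nat → Option String
  | 0 => none
  | Nat.succ j =>
      match L.find? (pvColHit j) with
      | some s => some s
      | none => pvScanCols L j

def tim_chuoi_co_vi_tri_in_hoa_lon_nhat_alt (L : List String) : String :=
  match pvScanCols L (pvMaxLen L) with
  | some s => s
  | none => "Không có chuỗi nào chứa ký tự in hoa!"

-- ===== PRECONDITION & SPEC =====
def Spec_tim_chuoi_co_vi_tri_in_hoa_lon_nhat (L : List String) (out : String) : Prop := out = tim_chuoi_co_vi_tri_in_hoa_lon_nhat_alt L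
instance (L : List String) (out : String) : Decidable (Spec_tim_chuoi_co_vi_tri_in_hoa_lon_nhat L out) := by unfold Spec_tim_chuoi_co_vi_tri_in_hoa_lon_nhat; infer_instance

-- ===== CLAIM (what is proved, stated in full; the proofs are below) =====
def Claim_equal_tim_chuoi_co_vi_tri_in_hoa_lon_nhat : Prop := ∀ (L : List String), Dom_tim_chuoi_co_vi_tri_in_hoa_lon_nhat L → Spec_tim_chuoi_co_vi_tri_in_hoa_lon_nhat L (tim_chuoi_co_vi_tri_in_hoa_lon_nhat L)

-- ===== LEMMAS AND PROOFS =====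

-- list-level version of A's helper
def pvFA (cs : List Char) : Int :=
  (PySem.List.enumerate cs 0).foldl
    (fun vi_tri ic => if PySem.Str.isupper ic.2 then ic.1 else vi_tri) (-1)

lemma pvFA_snoc (cs : List Char) (c : Char) :
    pvFA (cs ++ [c]) = if PySem.Str.isupper c then (cs.length : Int) else pvFA cs := by
  unfold pvFA
  rw [PySem.List.enumerate_append, List.foldl_append]
  simp [PySem.List.enumerate_cons]

lemma pvFA_lt_len (cs : List Char) : pvFA cs < (cs.length : Int) := by
  induction cs using List.reverseRecOn with
  | nil => simp [pvFA, PySem.List.enumerate]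
  | append_singleton t c ih =>
      rw [pvFA_snoc]
      simp only [List.length_append, List.length_cons, List.length_nil]
      split <;> push_cast <;> omega

-- hit at column j on a list of chars
def pvHit (cs : List Char) (j : Nat) : Bool :=
  match cs[j]? with
  | some c => PySem.Str.isupper c
  | none => false

lemma pvColHit_eq (j : Nat) (s : String) : pvColHit j s = pvHit s.toList j := rfl

lemma pvHit_snoc (cs : List Char) (c : Char) (j : Nat) :
    pvHit (cs ++ [c]) j = if j = cs.length then PySem.Str.isupper c else pvHit cs j := by
  unfold pvHit
  by_cases he : j = cs.length
  · subst he
    simp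
  · rw [if_neg he]
    by_cases h : j < cs.length
    · rw [List.getElem?_append_left h]
    · rw [List.getElem?_eq_none (l := cs) (by omega),
          List.getElem?_eq_none (by simp; omega)]

lemma pvHit_le_pvFA (cs : List Char) (j : Nat) (h : pvHit cs j = true) :
    (j : Int) ≤ pvFA cs := by
  induction cs using List.reverseRecOn with
  | nil => simp [pvHit] at h
  | append_singleton t c ih =>
      rw [pvHit_snoc] at h
      rw [pvFA_snoc]
      by_cases he : j = t.length
      · rw [if_pos he] at h
        rw [if_pos h]
        omega
      · rw [if_neg he] at h
        have := ih h
        have hlt := pvFA_lt_len t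
        split <;> omega

lemma pvFA_hit (cs : List Char) (j : Nat) (h : pvFA cs = (j : Int)) :
    pvHit cs j = true := by
  induction cs using List.reverseRecOn with
  | nil =>
      exfalso
      have h0 : pvFA ([] : List Char) = -1 := rfl
      omega
  | append_singleton t c ih =>
      rw [pvFA_snoc] at h
      rw [pvHit_snoc]
      by_cases hu : PySem.Str.isupper c = true
      · simp [hu] at h
        have : j = t.length := by omega
        simp [this, hu]
      · simp [hu] at h
        have hlt := pvFA_lt_len t
        have : j ≠ t.length := by omega
        simp [this]
        exact ih h

-- abbreviations for A's fold
def pvStepA (acc : Option String × Int) (chuoi : String) : Option String × Int :=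
  let vi_tri := vi_tri_in_hoa_lon_nhat chuoi
  if acc.2 < vi_tri then (some chuoi, vi_tri) else acc

def pvMaxF (L : List String) (m : Int) : Int :=
  L.foldl (fun a s => max a (vi_tri_in_hoa_lon_nhat s)) m

lemma le_pvMaxF (L : List String) (m : Int) : m ≤ pvMaxF L m := by
  induction L generalizing m with
  | nil => simp [pvMaxF]
  | cons x t ih =>
      have := ih (max m (vi_tri_in_hoa_lon_nhat x))
      simp only [pvMaxF, List.foldl_cons] at *
      omega

lemma elem_le_pvMaxF (L : List String) (m : Int) (s : String) (hs : s ∈ L) :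
    vi_tri_in_hoa_lon_nhat s ≤ pvMaxF L m := by
  induction L generalizing m with
  | nil => simp at hs
  | cons x t ih =>
      simp only [pvMaxF, List.foldl_cons]
      rcases List.mem_cons.mp hs with h | h
      · subst h
        have := le_pvMaxF t (max m (vi_tri_in_hoa_lon_nhat s))
        simp only [pvMaxF] at this
        omega
      · exact ih _ h

lemma pvMaxF_attained (L : List String) (m : Int) :
    pvMaxF L m = m ∨ ∃ s ∈ L, vi_tri_in_hoa_lon_nhat s = pvMaxF L m := by
  induction L generalizing m with
  | nil => left; rfl
  | cons x t ih =>
      simp only [pvMaxF, List.foldl_cons]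
      rcases ih (max m (vi_tri_in_hoa_lon_nhat x)) with h | ⟨s, hs, he⟩
      · simp only [pvMaxF] at h
        rw [h]
        by_cases hm : vi_tri_in_hoa_lon_nhat x ≤ m
        · left; omega
        · right
          exact ⟨x, List.mem_cons_self .., by omega⟩
      · right
        exact ⟨s, List.mem_cons_of_mem _ hs, he⟩

lemma foldA_noupdate (L : List String) (o : Option String) (m : Int)
    (h : pvMaxF L m ≤ m) : L.foldl pvStepA (o, m) = (o, m) := by
  induction L generalizing o m with
  | nil => rfl
  | cons x t ih =>
      have hx : vi_tri_in_hoa_lon_nhat x ≤ m := by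
        have := elem_le_pvMaxF (x :: t) m x (List.mem_cons_self ..)
        omega
      have ht : pvMaxF t m ≤ m := by
        have : pvMaxF (x :: t) m = pvMaxF t (max m (vi_tri_in_hoa_lon_nhat x)) := rfl
        have h2 := le_pvMaxF t (max m (vi_tri_in_hoa_lon_nhat x))
        have h3 : max m (vi_tri_in_hoa_lon_nhat x) = m := by omega
        rw [h3] at this
        omega
      simp only [List.foldl_cons, pvStepA]
      rw [if_neg (by omega)]
      exact ih o m ht

lemma foldA_fst (L : List String) (o : Option String) (m : Int)
    (h : m < pvMaxF L m) :
    (L.foldl pvStepA (o, m)).1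
      = L.find? (fun s => vi_tri_in_hoa_lon_nhat s == pvMaxF L m) := by
  induction L generalizing o m with
  | nil => simp [pvMaxF] at h
  | cons x t ih =>
      have hJ : pvMaxF (x :: t) m = pvMaxF t (max m (vi_tri_in_hoa_lon_nhat x)) := rfl
      simp only [List.foldl_cons, pvStepA]
      by_cases hx : m < vi_tri_in_hoa_lon_nhat x
      · rw [if_pos hx]
        have hmx : max m (vi_tri_in_hoa_lon_nhat x) = vi_tri_in_hoa_lon_nhat x := by omega
        by_cases hrec : vi_tri_in_hoa_lon_nhat x < pvMaxF t (vi_tri_in_hoa_lon_nhat x)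
        · rw [List.find?_cons_of_neg (by rw [hJ, hmx]; simp; omega)]
          have := ih (some x) (vi_tri_in_hoa_lon_nhat x) hrec
          rw [hJ, hmx]
          exact this
        · have heq : pvMaxF (x :: t) m = vi_tri_in_hoa_lon_nhat x := by
            have := le_pvMaxF t (vi_tri_in_hoa_lon_nhat x)
            rw [hJ, hmx]; omega
          rw [List.find?_cons_of_pos (by simp [heq])]
          rw [foldA_noupdate t (some x) (vi_tri_in_hoa_lon_nhat x) (by omega)]
      · rw [if_neg (by omega)]
        have hmx : max m (vi_tri_in_hoa_lon_nhat x) = m := by omega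
        have ht : m < pvMaxF t m := by rw [hJ, hmx] at h; exact h
        rw [List.find?_cons_of_neg (by rw [hJ, hmx]; simp; omega), hJ, hmx]
        exact ih o m ht

-- B side -------------------------------------------------------------

lemma find?_congr_mem {α : Type} (l : List α) (p q : α → Bool)
    (h : ∀ x ∈ l, p x = q x) : l.find? p = l.find? q := by
  induction l with
  | nil => rfl
  | cons x t ih =>
      simp only [List.find?_cons]
      rw [h x (List.mem_cons_self ..)]
      split
      · rfl
      · exact ih (fun y hy => h y (List.mem_cons_of_mem _ hy))

lemma pvScanCols_none (L : List String) (n : Nat)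
    (h : ∀ s ∈ L, vi_tri_in_hoa_lon_nhat s < 0) : pvScanCols L n = none := by
  induction n with
  | zero => rfl
  | succ j ih =>
      have hf : L.find? (pvColHit j) = none := by
        rw [List.find?_eq_none]
        intro s hs hhit
        have h1 := pvHit_le_pvFA s.toList j hhit
        have h2 := h s hs
        have h3 : vi_tri_in_hoa_lon_nhat s = pvFA s.toList := rfl
        omega
      simp [pvScanCols, hf, ih]

lemma pvScanCols_found (L : List String) (J : Nat) (n : Nat)
    (hle : ∀ s ∈ L, vi_tri_in_hoa_lon_nhat s ≤ (J : Int))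
    (hex : ∃ s ∈ L, vi_tri_in_hoa_lon_nhat s = (J : Int))
    (hn : J < n) :
    pvScanCols L n = L.find? (pvColHit J) := by
  induction n with
  | zero => omega
  | succ j ih =>
      by_cases hj : J = j
      · subst hj
        obtain ⟨s, hs, he⟩ := hex
        have he' : pvFA s.toList = (J : Int) := he
        have hhit : pvColHit J s = true := pvFA_hit s.toList J he'
        obtain ⟨r, hr⟩ := Option.isSome_iff_exists.mp
          (List.find?_isSome.mpr ⟨s, hs, hhit⟩)
        simp [pvScanCols, hr]
      · have hjn : J < j := by omega
        have hf : L.find? (pvColHit j) = none := by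
          rw [List.find?_eq_none]
          intro s hs hhit
          have h1 := pvHit_le_pvFA s.toList j hhit
          have h2 := hle s hs
          have h3 : vi_tri_in_hoa_lon_nhat s = pvFA s.toList := rfl
          omega
        simp [pvScanCols, hf, ih hjn]

lemma start_le_foldl_maxlen (t : List String) (m : Nat) :
    m ≤ t.foldl (fun m s => max m s.toList.length) m := by
  induction t generalizing m with
  | nil => simp
  | cons y u ih =>
      simp only [List.foldl_cons]
      exact le_trans (Nat.le_max_left _ _) (ih _)

lemma len_le_pvMaxLen (L : List String) (s : String) (hs : s ∈ L) :
    s.toList.length ≤ pvMaxLen L := by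
  unfold pvMaxLen
  have gen : ∀ (l : List String) (m : Nat), s ∈ l →
      s.toList.length ≤ l.foldl (fun m s => max m s.toList.length) m := by
    intro l
    induction l with
    | nil => intro m h; simp at h
    | cons x t ih =>
        intro m h
        rcases List.mem_cons.mp h with h | h
        · subst h
          simp only [List.foldl_cons]
          exact le_trans (Nat.le_max_right _ _) (start_le_foldl_maxlen t _)
        · exact ih _ h
  exact gen L 0 hs

lemma pvFA_empty : pvFA [] = -1 := rfl

-- ===== VERDICT (by name: the statement is the Claim_ definition above) =====
theorem tim_chuoi_co_vi_tri_in_hoa_lon_nhat_spec : Claim_equal_tim_chuoi_co_vi_tri_in_hoa_lon_nhat := by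
  intro L _
  show tim_chuoi_co_vi_tri_in_hoa_lon_nhat L = tim_chuoi_co_vi_tri_in_hoa_lon_nhat_alt L
  unfold tim_chuoi_co_vi_tri_in_hoa_lon_nhat tim_chuoi_co_vi_tri_in_hoa_lon_nhat_alt
  have hstep : (fun (acc : Option String × Int) chuoi =>
      let vi_tri := vi_tri_in_hoa_lon_nhat chuoi
      if acc.2 < vi_tri then (some chuoi, vi_tri) else acc) = pvStepA := rfl
  rw [hstep]
  by_cases hJ : pvMaxF L (-1) ≤ -1
  · -- no string has an uppercase character
    have hneg : ∀ s ∈ L, vi_tri_in_hoa_lon_nhat s < 0 := by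
      intro s hs
      have := elem_le_pvMaxF L (-1) s hs
      omega
    rw [foldA_noupdate L none (-1) hJ, pvScanCols_none L _ hneg]
  · rw [not_le] at hJ
    have hfst := foldA_fst L none (-1) hJ
    rcases pvMaxF_attained L (-1) with h | ⟨s0, hs0, he0⟩
    · omega
    have hJ0 : 0 ≤ pvMaxF L (-1) := by omega
    set J : Int := pvMaxF L (-1) with hJdef
    obtain ⟨Jn, hJn⟩ : ∃ n : Nat, J = (n : Int) := ⟨J.toNat, by omega⟩
    -- B's scan stops at column Jn
    have hlen : Jn < pvMaxLen L := by
      have h1 := pvFA_lt_len s0.toList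
      have h2 := len_le_pvMaxLen L s0 hs0
      have : vi_tri_in_hoa_lon_nhat s0 = pvFA s0.toList := rfl
      omega
    have hscan := pvScanCols_found L Jn (pvMaxLen L)
      (fun s hs => by rw [← hJn]; exact elem_le_pvMaxF L (-1) s hs)
      ⟨s0, hs0, by rw [← hJn]; exact he0⟩ hlen
    have hsame : L.find? (pvColHit Jn)
        = L.find? (fun s => vi_tri_in_hoa_lon_nhat s == J) := by
      apply find?_congr_mem
      intro s hs
      by_cases hh : pvColHit Jn s = true
      · have h1 := pvHit_le_pvFA s.toList Jn hh
        have h2 := elem_le_pvMaxF L (-1) s hs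
        have : vi_tri_in_hoa_lon_nhat s = J := by
          have : vi_tri_in_hoa_lon_nhat s = pvFA s.toList := rfl
          omega
        simp [hh, this]
      · simp only [Bool.not_eq_true] at hh
        rw [hh]
        by_cases he : vi_tri_in_hoa_lon_nhat s = J
        · exfalso
          have : pvFA s.toList = (Jn : Int) := by
            have : vi_tri_in_hoa_lon_nhat s = pvFA s.toList := rfl
            omega
          have := pvFA_hit s.toList Jn this
          rw [pvColHit_eq] at hh
          simp [hh] at this
        · simp [he]
    rw [hscan, hsame, hfst]
    -- both are find? of the same predicate; A additionally checks non-emptiness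
    rcases hfind : L.find? (fun s => vi_tri_in_hoa_lon_nhat s == J) with _ | c
    · rfl
    · have hc := List.find?_some hfind
      simp only [beq_iff_eq] at hc
      have hne : c ≠ "" := by
        intro he
        rw [he] at hc
        have : vi_tri_in_hoa_lon_nhat "" = pvFA [] := rfl
        rw [pvFA_empty] at this
        omega
      simp [hne]
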